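-- pv_equiv track=rewrite | github.com/zara-me/My-ITMO-2025 | Info/lab4/final.py | yaml_to_xml
-- ===== SOURCE A (Python) =====
-- def yaml_to_xml(yaml_content):
--     def process_line(line, indent_level):
--         stripped_line = line.strip()
--         if ": " in stripped_line:  # Ключ-значение
--             key, value = stripped_line.split(": ", 1)
--             return f"{'  ' * indent_level}<{key}>{value}</{key}>\n"
--         elif ":" in stripped_line:  # Ключ (начало вложенной структуры)
--             key = stripped_line[:-1]
--             return f"{'  ' * indent_level}<{key}>\n"
--         else:
--             return ""
--
--     lines = yaml_content.splitlines()
--     xml_output = "<root>\n"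
--     indent_level = 1
--     stack = []
--
--     for line in lines:
--         if not line.strip():  # Пропуск пустых строк
--             continue
--
--         current_indent = len(line) - len(line.lstrip())
--
--         # Закрытие тегов при уменьшении вложенности
--         while stack and stack[-1][1] >= current_indent:
--             last_key = stack.pop()[0]
--             xml_output += f"{'  ' * indent_level}</{last_key}>\n"
--             indent_level -= 1
--
--         # Обработка строки
--         if ": " in line.strip():
--             key, _ = line.strip().split(": ", 1)
--             xml_output += process_line(line, indent_level)
--         elif ":" in line.strip():
--             key = line.strip()[:-1]
--             xml_output += process_line(line, indent_level)
--             stack.append((key, current_indent))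
--             indent_level += 1
--
--     # Закрытие оставшихся открытых тегов
--     while stack:
--         last_key = stack.pop()[0]
--         xml_output += f"{'  ' * indent_level}</{last_key}>\n"
--         indent_level -= 1
--
--     xml_output += "</root>"
--     return xml_output
-- ===== SOURCE B (Python) =====
-- def yaml_to_xml(yaml_content):
--     lines = [l for l in yaml_content.splitlines() if l.strip()]
--
--     def emit(rest, floor, depth):
--         # consume lines while their indent exceeds `floor`; return (remaining, xml text)
--         if not rest:
--             return rest, ""
--         line = rest[0]
--         stripped = line.strip()
--         indent = len(line) - len(line.lstrip())
--         if indent <= floor: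
--             return rest, ""
--         if ": " in stripped:
--             key, value = stripped.split(": ", 1)
--             rem, tail = emit(rest[1:], floor, depth)
--             return rem, f"{'  ' * depth}<{key}>{value}</{key}>\n" + tail
--         if ":" in stripped:
--             key = stripped[:-1]
--             rem, inner = emit(rest[1:], indent, depth + 1)
--             rem2, tail = emit(rem, floor, depth)
--             return rem2, f"{'  ' * depth}<{key}>\n" + inner + f"{'  ' * (depth + 1)}</{key}>\n" + tail
--         return emit(rest[1:], floor, depth)
--
--     _, body = emit(lines, -1, 1)
--     return "<root>\n" + body + "</root>"
-- ===== Notes on version B (the rewrite author's own statement) =====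
-- stated objective: alternative
-- what changed: Replaces A's imperative loop with an explicit (key, indent) stack and a mutable indent_level counter by a recursive-descent parser over the blank-filtered lines: a helper emit(rest, floor, depth) consumes lines while their indentation exceeds floor, emitting key-value tags directly and recursing for nested blocks, so closing tags are emitted on return instead of by a stack-popping while loop.
import Mathlib
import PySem

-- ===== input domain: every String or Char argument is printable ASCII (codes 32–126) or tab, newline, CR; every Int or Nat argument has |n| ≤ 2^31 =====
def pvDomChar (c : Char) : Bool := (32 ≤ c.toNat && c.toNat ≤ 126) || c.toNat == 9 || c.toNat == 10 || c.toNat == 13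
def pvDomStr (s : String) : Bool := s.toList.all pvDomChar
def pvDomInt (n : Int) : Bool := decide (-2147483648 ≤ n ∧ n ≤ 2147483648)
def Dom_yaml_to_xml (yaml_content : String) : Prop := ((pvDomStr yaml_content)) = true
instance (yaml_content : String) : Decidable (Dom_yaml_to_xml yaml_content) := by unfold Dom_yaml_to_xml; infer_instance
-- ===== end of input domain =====

-- B replaces A's explicit (key, indent) stack / indent_level bookkeeping by a recursive descent
-- over the blank-filtered lines (objective: alternative decomposition, same output).

-- ===== PORT A =====
-- '  ' * n  (Python string repetition; negative factor gives "")
def pvRepN : Nat → String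
  | 0 => ""
  | n + 1 => "  " ++ pvRepN n

def pvRep (n : Int) : String := pvRepN n.toNat

-- len(line) - len(line.lstrip())
def pvIndent (line : String) : Int :=
  PySem.Str.len line - PySem.Str.len (PySem.Str.lstrip line)

-- A's process_line(line, indent_level); the '| _ => ""' arm of the match is unreachable
-- (": " occurs in s, so the split has at least two parts)
def pvProcessLine (line : String) (indentLevel : Int) : String :=
  let s := PySem.Str.strip line
  if PySem.Str.isIn ": " s then
    match PySem.Str.splitMax? s ": " 1 with
    | some (key :: value :: _) =>
        pvRep indentLevel ++ "<" ++ key ++ ">" ++ value ++ "</" ++ key ++ ">\n"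
    | _ => ""
  else if PySem.Str.isIn ":" s then
    pvRep indentLevel ++ "<" ++ PySem.Str.slice s none (some (-1)) ++ ">\n"
  else ""

-- A's 'while stack and stack[-1][1] >= current_indent' closing loop (stack top at head)
def pvClose : String → Int → List (String × Int) → Int → String × Int × List (String × Int)
  | acc, il, [], _ => (acc, il, [])
  | acc, il, (k, i) :: st, cur =>
    if i ≥ cur then pvClose (acc ++ pvRep il ++ "</" ++ k ++ ">\n") (il - 1) st cur
    else (acc, il, (k, i) :: st)

-- the body of A's 'for line in lines' loop
def pvStepA (state : String × Int × List (String × Int)) (line : String) :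
    String × Int × List (String × Int) :=
  if PySem.Str.strip line == "" then state
  else
    let cur := pvIndent line
    let r := pvClose state.1 state.2.1 state.2.2 cur
    let s := PySem.Str.strip line
    if PySem.Str.isIn ": " s then (r.1 ++ pvProcessLine line r.2.1, r.2.1, r.2.2)
    else if PySem.Str.isIn ":" s then
      (r.1 ++ pvProcessLine line r.2.1, r.2.1 + 1,
       (PySem.Str.slice s none (some (-1)), cur) :: r.2.2)
    else (r.1, r.2.1, r.2.2)

-- A's final 'while stack' loop
def pvCloseAll : String → Int → List (String × Int) → String
  | acc, _, [] => acc
  | acc, il, (k, _) :: st => pvCloseAll (acc ++ pvRep il ++ "</" ++ k ++ ">\n") (il - 1) st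

def yaml_to_xml (yaml_content : String) : String :=
  let lines := PySem.Str.splitlines yaml_content
  let r := lines.foldl pvStepA ("<root>\n", 1, [])
  pvCloseAll r.1 r.2.1 r.2.2 ++ "</root>"

-- ===== PORT B =====
-- B's recursive emit(rest, floor, depth) -> (remaining, text); fuel = rest.length is a pure
-- totality guard (the Python recursion needs none).  The '| _ => ""' chunk arm is unreachable.
def pvEmit : Nat → List String → Int → Int → List String × String
  | 0, rest, _, _ => (rest, "")
  | _ + 1, [], _, _ => ([], "")
  | fuel + 1, line :: ls, floor, depth =>
    let s := PySem.Str.strip line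
    let ind := pvIndent line
    if ind ≤ floor then (line :: ls, "")
    else if PySem.Str.isIn ": " s then
      let chunk := match PySem.Str.splitMax? s ": " 1 with
        | some (key :: value :: _) =>
            pvRep depth ++ "<" ++ key ++ ">" ++ value ++ "</" ++ key ++ ">\n"
        | _ => ""
      let r := pvEmit fuel ls floor depth
      (r.1, chunk ++ r.2)
    else if PySem.Str.isIn ":" s then
      let key := PySem.Str.slice s none (some (-1))
      let r1 := pvEmit fuel ls ind (depth + 1)
      let r2 := pvEmit fuel r1.1 floor depth
      (r2.1, pvRep depth ++ "<" ++ key ++ ">\n" ++ r1.2 ++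
             pvRep (depth + 1) ++ "</" ++ key ++ ">\n" ++ r2.2)
    else pvEmit fuel ls floor depth

def yaml_to_xml_alt (yaml_content : String) : String :=
  let lines := (PySem.Str.splitlines yaml_content).filter (fun l => !(PySem.Str.strip l == ""))
  "<root>\n" ++ (pvEmit lines.length lines (-1) 1).2 ++ "</root>"

-- ===== PRECONDITION & SPEC =====
def Spec_yaml_to_xml (yaml_content : String) (out : String) : Prop := out = yaml_to_xml_alt yaml_content
instance (yaml_content : String) (out : String) : Decidable (Spec_yaml_to_xml yaml_content out) := by unfold Spec_yaml_to_xml; infer_instance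

-- ===== CLAIM (what is proved, stated in full; the proofs are below) =====
def Claim_equal_yaml_to_xml : Prop := ∀ (yaml_content : String), Dom_yaml_to_xml yaml_content → Spec_yaml_to_xml yaml_content (yaml_to_xml yaml_content)

-- ===== LEMMAS AND PROOFS =====

-- spec-level view of A's loop: pops one stack frame at a time, indent_level = stack.length + 1
def runA : List String → List (String × Int) → String
  | [], [] => ""
  | [], (k, _) :: st => pvRep ((st.length : Int) + 2) ++ "</" ++ k ++ ">\n" ++ runA [] st
  | l :: ls, [] =>
    if PySem.Str.strip l == "" then runA ls []
    else
      let s := PySem.Str.strip l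
      if PySem.Str.isIn ": " s then pvProcessLine l 1 ++ runA ls []
      else if PySem.Str.isIn ":" s then
        pvProcessLine l 1 ++ runA ls [(PySem.Str.slice s none (some (-1)), pvIndent l)]
      else runA ls []
  | l :: ls, (k, i) :: st' =>
    if PySem.Str.strip l == "" then runA ls ((k, i) :: st')
    else if i ≥ pvIndent l then
      pvRep ((st'.length : Int) + 2) ++ "</" ++ k ++ ">\n" ++ runA (l :: ls) st'
    else
      let s := PySem.Str.strip l
      if PySem.Str.isIn ": " s then
        pvProcessLine l ((st'.length : Int) + 2) ++ runA ls ((k, i) :: st')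
      else if PySem.Str.isIn ":" s then
        pvProcessLine l ((st'.length : Int) + 2) ++
          runA ls ((PySem.Str.slice s none (some (-1)), pvIndent l) :: (k, i) :: st')
      else runA ls ((k, i) :: st')
  termination_by lines st => 2 * lines.length + st.length

-- B-side glue: the output still owed once the loop state has stack st and input rest
def pvWrap : List (String × Int) → List String → String
  | [], rest => (pvEmit rest.length rest (-1) 1).2
  | (k, _i) :: st', rest =>
    let r := pvEmit rest.length rest _i ((st'.length : Int) + 2)
    r.2 ++ pvRep ((st'.length : Int) + 2) ++ "</" ++ k ++ ">\n" ++ pvWrap st' r.1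

lemma pvIndent_nonneg (l : String) : 0 ≤ pvIndent l := by
  simp only [pvIndent, PySem.Str.len_eq, PySem.Str.toList_lstrip, PySem.Chars.lstrip]
  have := List.length_dropWhile_le (p := PySem.Chars.isspace) (l := l.toList)
  omega

lemma pvEmit_len (fuel : Nat) (rest : List String) (floor depth : Int) :
    (pvEmit fuel rest floor depth).1.length ≤ rest.length := by
  induction fuel generalizing rest floor depth with
  | zero => simp [pvEmit]
  | succ n ih =>
    cases rest with
    | nil => simp [pvEmit]
    | cons l ls =>
      simp only [pvEmit]
      split_ifs with h1 h2 h3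
      · simp
      · simpa using Nat.le_succ_of_le (ih ls floor depth)
      · have a1 := ih ls (pvIndent l) (depth + 1)
        have a2 := ih (pvEmit n ls (pvIndent l) (depth + 1)).1 floor depth
        simp only [List.length_cons]
        omega
      · exact Nat.le_succ_of_le (ih ls floor depth)

lemma pvEmit_fuel (n m : Nat) (rest : List String) (floor depth : Int)
    (hn : rest.length ≤ n) (hm : rest.length ≤ m) :
    pvEmit n rest floor depth = pvEmit m rest floor depth := by
  induction n generalizing m rest floor depth with
  | zero =>
    have : rest = [] := by
      cases rest with
      | nil => rfl
      | cons a b => simp at hn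
    subst this
    cases m <;> simp [pvEmit]
  | succ n ih =>
    cases rest with
    | nil => cases m <;> simp [pvEmit]
    | cons l ls =>
      cases m with
      | zero => simp at hm
      | succ m =>
        simp only [List.length_cons, Nat.succ_le_succ_iff] at hn hm
        simp only [pvEmit]
        split_ifs with h1 h2 h3
        · rfl
        · rw [ih m ls floor depth hn hm]
        · rw [ih m ls (pvIndent l) (depth + 1) hn hm,
              ih m (pvEmit m ls (pvIndent l) (depth + 1)).1 floor depth
                (le_trans (by simpa using pvEmit_len m ls (pvIndent l) (depth + 1)) hn)
                (le_trans (by simpa using pvEmit_len m ls (pvIndent l) (depth + 1)) hm)]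
        · exact ih m ls floor depth hn hm

lemma closeAll_eq (st : List (String × Int)) (acc : String) :
    pvCloseAll acc ((st.length : Int) + 1) st = acc ++ runA [] st := by
  induction st generalizing acc with
  | nil => simp [pvCloseAll, runA]
  | cons p st ih =>
    obtain ⟨k, i⟩ := p
    simp only [pvCloseAll, List.length_cons, runA]
    push_cast
    have h1 : (st.length : Int) + 1 + 1 - 1 = (st.length : Int) + 1 := by ring
    have h2 : (st.length : Int) + 1 + 1 = (st.length : Int) + 2 := by ring
    rw [h1, h2, ih]
    simp [String.append_assoc]

lemma stepA_blank (l : String) (s : String × Int × List (String × Int))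
    (hb : (PySem.Str.strip l == "") = true) : pvStepA s l = s := by
  simp [pvStepA, hb]

lemma stepA_pop (l acc : String) (k : String) (i : Int) (st' : List (String × Int))
    (hb : ¬(PySem.Str.strip l == "") = true) (hp : i ≥ pvIndent l) :
    pvStepA (acc, (st'.length : Int) + 2, (k, i) :: st') l =
    pvStepA (acc ++ pvRep ((st'.length : Int) + 2) ++ "</" ++ k ++ ">\n",
             (st'.length : Int) + 1, st') l := by
  have hc : pvClose acc ((st'.length : Int) + 2) ((k, i) :: st') (pvIndent l) =
      pvClose (acc ++ pvRep ((st'.length : Int) + 2) ++ "</" ++ k ++ ">\n")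
        ((st'.length : Int) + 1) st' (pvIndent l) := by
    rw [pvClose]
    simp only [hp, if_true]
    have e : (st'.length : Int) + 2 - 1 = (st'.length : Int) + 1 := by ring
    rw [e]
  simp only [pvStepA, hb]
  rw [hc]
  simp only [Bool.false_eq_true, if_false]

lemma stepA_nopop (l acc : String) (st : List (String × Int))
    (hb : ¬(PySem.Str.strip l == "") = true)
    (hnp : pvClose acc ((st.length : Int) + 1) st (pvIndent l) =
      (acc, (st.length : Int) + 1, st)) :
    pvStepA (acc, (st.length : Int) + 1, st) l =
    (if PySem.Str.isIn ": " (PySem.Str.strip l) then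
      (acc ++ pvProcessLine l ((st.length : Int) + 1), (st.length : Int) + 1, st)
     else if PySem.Str.isIn ":" (PySem.Str.strip l) then
      (acc ++ pvProcessLine l ((st.length : Int) + 1), (st.length : Int) + 1 + 1,
       (PySem.Str.slice (PySem.Str.strip l) none (some (-1)), pvIndent l) :: st)
     else (acc, (st.length : Int) + 1, st)) := by
  simp only [pvStepA, hb, hnp]
  simp only [Bool.false_eq_true, if_false]

lemma foldA_aux : ∀ (n : Nat) (lines : List String) (st : List (String × Int)) (acc : String),
    2 * lines.length + st.length ≤ n →
    (let r := lines.foldl pvStepA (acc, (st.length : Int) + 1, st);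
     pvCloseAll r.1 r.2.1 r.2.2) = acc ++ runA lines st := by
  intro n
  induction n with
  | zero =>
    intro lines st acc h
    cases lines with
    | cons l ls => simp at h
    | nil =>
      cases st with
      | cons p s => simp at h
      | nil => simp [pvCloseAll, runA]
  | succ n ih =>
    intro lines st acc h
    cases lines with
    | nil => simpa using closeAll_eq st acc
    | cons l ls =>
      simp only [List.foldl_cons]
      by_cases hb : (PySem.Str.strip l == "") = true
      · rw [stepA_blank l _ hb]
        have hm : 2 * ls.length + st.length ≤ n := by
          simp only [List.length_cons] at h; omega
        have := ih ls st acc hm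
        simp only at this
        rw [this]
        congr 1
        cases st with
        | nil => conv_rhs => rw [runA]; simp only [hb, if_true]
        | cons p s =>
          obtain ⟨k, i⟩ := p
          conv_rhs => rw [runA]; simp only [hb, if_true]
      · cases st with
        | nil =>
          have hnp : pvClose acc ((([] : List (String × Int)).length : Int) + 1) []
              (pvIndent l) = (acc, (([] : List (String × Int)).length : Int) + 1, []) := by
            simp [pvClose]
          rw [stepA_nopop l acc [] hb hnp]
          simp only [List.length_nil, Nat.cast_zero, zero_add]
          by_cases hkv : PySem.Str.isIn ": " (PySem.Str.strip l) = true
          · simp only [hkv, if_true]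
            have hm : 2 * ls.length + ([] : List (String × Int)).length ≤ n := by
              simp only [List.length_cons, List.length_nil] at h ⊢; omega
            have := ih ls [] (acc ++ pvProcessLine l 1) hm
            simp only [List.length_nil, Nat.cast_zero, zero_add] at this
            rw [this]
            conv_rhs => rw [runA]
            simp only [hb, hkv, Bool.false_eq_true, if_false, if_true]
            simp [String.append_assoc]
          · by_cases hk : PySem.Str.isIn ":" (PySem.Str.strip l) = true
            · simp only [hkv, hk, Bool.false_eq_true, if_false, if_true]
              set st2 : List (String × Int) :=
                [(PySem.Str.slice (PySem.Str.strip l) none (some (-1)), pvIndent l)] with hst2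
              have e : (1 + 1 : Int) = (st2.length : Int) + 1 := by
                simp [hst2]
              rw [e]
              have hm : 2 * ls.length + st2.length ≤ n := by
                simp only [List.length_cons, hst2, List.length_singleton] at h ⊢; omega
              have := ih ls st2 (acc ++ pvProcessLine l 1) hm
              simp only at this
              rw [this]
              conv_rhs => rw [runA]
              simp only [hb, hkv, hk, Bool.false_eq_true, if_false, if_true]
              simp [String.append_assoc, hst2]
            · simp only [hkv, hk, Bool.false_eq_true, if_false]
              have hm : 2 * ls.length + ([] : List (String × Int)).length ≤ n := by
                simp only [List.length_cons, List.length_nil] at h ⊢; omega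
              have := ih ls [] acc hm
              simp only [List.length_nil, Nat.cast_zero, zero_add] at this
              rw [this]
              conv_rhs => rw [runA]
              simp only [hb, hkv, hk, Bool.false_eq_true, if_false]
        | cons p st' =>
          obtain ⟨k, i⟩ := p
          by_cases hp : i ≥ pvIndent l
          · have e2 : ((((k, i) :: st').length : Int) + 1) = (st'.length : Int) + 2 := by
              push_cast [List.length_cons]; ring
            rw [e2, stepA_pop l acc k i st' hb hp, ← List.foldl_cons]
            have hm : 2 * (l :: ls).length + st'.length ≤ n := by
              simp only [List.length_cons] at h ⊢; omega
            have := ih (l :: ls) st'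
              (acc ++ pvRep ((st'.length : Int) + 2) ++ "</" ++ k ++ ">\n") hm
            simp only at this
            rw [this]
            conv_rhs => rw [runA]
            simp only [hb, hp, Bool.false_eq_true, if_false, if_true]
            simp [String.append_assoc]
          · have hnp : pvClose acc ((((k, i) :: st').length : Int) + 1) ((k, i) :: st')
                (pvIndent l) = (acc, ((((k, i) :: st').length : Int) + 1), (k, i) :: st') := by
              rw [pvClose]
              simp [hp]
            rw [stepA_nopop l acc ((k, i) :: st') hb hnp]
            by_cases hkv : PySem.Str.isIn ": " (PySem.Str.strip l) = true
            · simp only [hkv, if_true]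
              have hm : 2 * ls.length + ((k, i) :: st').length ≤ n := by
                simp only [List.length_cons] at h ⊢; omega
              have := ih ls ((k, i) :: st')
                (acc ++ pvProcessLine l ((((k, i) :: st').length : Int) + 1)) hm
              simp only at this
              rw [this]
              conv_rhs => rw [runA]
              simp only [hb, hp, hkv, Bool.false_eq_true, if_false, if_true]
              have e3 : ((((k, i) :: st').length : Int) + 1) = (st'.length : Int) + 2 := by
                push_cast [List.length_cons]; ring
              rw [e3]
              simp [String.append_assoc]
            · by_cases hk : PySem.Str.isIn ":" (PySem.Str.strip l) = true
              · simp only [hkv, hk, Bool.false_eq_true, if_false, if_true]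
                set st2 : List (String × Int) :=
                  (PySem.Str.slice (PySem.Str.strip l) none (some (-1)), pvIndent l) ::
                    (k, i) :: st' with hst2
                have e : ((((k, i) :: st').length : Int) + 1 + 1) = (st2.length : Int) + 1 := by
                  simp only [hst2, List.length_cons]
                  push_cast; ring
                rw [e]
                have hm : 2 * ls.length + st2.length ≤ n := by
                  simp only [List.length_cons, hst2] at h ⊢; omega
                have := ih ls st2
                  (acc ++ pvProcessLine l ((((k, i) :: st').length : Int) + 1)) hm
                simp only at this
                rw [this]
                conv_rhs => rw [runA]
                simp only [hb, hp, hkv, hk, Bool.false_eq_true, if_false, if_true]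
                have e3 : ((((k, i) :: st').length : Int) + 1) = (st'.length : Int) + 2 := by
                  push_cast [List.length_cons]; ring
                rw [e3]
                simp [String.append_assoc, hst2]
              · simp only [hkv, hk, Bool.false_eq_true, if_false]
                have hm : 2 * ls.length + ((k, i) :: st').length ≤ n := by
                  simp only [List.length_cons] at h ⊢; omega
                have := ih ls ((k, i) :: st') acc hm
                simp only at this
                rw [this]
                conv_rhs => rw [runA]
                simp only [hb, hp, hkv, hk, Bool.false_eq_true, if_false]

lemma foldA_eq_runA (lines : List String) (st : List (String × Int)) (acc : String) :
    (let r := lines.foldl pvStepA (acc, (st.length : Int) + 1, st);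
     pvCloseAll r.1 r.2.1 r.2.2) = acc ++ runA lines st := by
  exact foldA_aux (2 * lines.length + st.length) lines st acc le_rfl

lemma runA_filter_aux : ∀ (n : Nat) (lines : List String) (st : List (String × Int)),
    2 * lines.length + st.length ≤ n →
    runA lines st = runA (lines.filter (fun l => !(PySem.Str.strip l == ""))) st := by
  intro n
  induction n with
  | zero =>
    intro lines st h
    cases lines with
    | nil => simp
    | cons l ls => simp at h
  | succ n ih =>
    intro lines st h
    cases lines with
    | nil => simp
    | cons l ls =>
      by_cases hb : (PySem.Str.strip l == "") = true
      · have hf : (l :: ls).filter (fun l => !(PySem.Str.strip l == "")) =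
            ls.filter (fun l => !(PySem.Str.strip l == "")) := by
          simp [List.filter_cons, hb]
        rw [hf]
        have hl : runA (l :: ls) st = runA ls st := by
          cases st with
          | nil => rw [runA]; simp [hb]
          | cons p s => obtain ⟨k, i⟩ := p; rw [runA]; simp [hb]
        rw [hl]
        exact ih ls st (by simp only [List.length_cons] at h; omega)
      · have hf : (l :: ls).filter (fun l => !(PySem.Str.strip l == "")) =
            l :: ls.filter (fun l => !(PySem.Str.strip l == "")) := by
          simp [List.filter_cons, hb]
        rw [hf]
        cases st with
        | nil =>
          rw [runA]
          conv_rhs => rw [runA]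
          simp only [hb, Bool.false_eq_true, if_false]
          split_ifs with hkv hk
          · rw [ih ls [] (by simp only [List.length_cons] at h; omega)]
          · rw [ih ls [(PySem.Str.slice (PySem.Str.strip l) none (some (-1)), pvIndent l)]
              (by simp only [List.length_cons, List.length_singleton] at h ⊢; omega)]
          · exact ih ls [] (by simp only [List.length_cons] at h; omega)
        | cons p st' =>
          obtain ⟨k, i⟩ := p
          rw [runA]
          conv_rhs => rw [runA]
          simp only [hb, Bool.false_eq_true, if_false]
          split_ifs with hp hkv hk
          · have := ih (l :: ls) st'
              (by simp only [List.length_cons] at h ⊢; omega)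
            rw [hf] at this
            rw [this]
          · rw [ih ls ((k, i) :: st')
              (by simp only [List.length_cons] at h ⊢; omega)]
          · rw [ih ls ((PySem.Str.slice (PySem.Str.strip l) none (some (-1)), pvIndent l) ::
                (k, i) :: st')
              (by simp only [List.length_cons] at h ⊢; omega)]
          · exact ih ls ((k, i) :: st')
              (by simp only [List.length_cons] at h ⊢; omega)

lemma runA_filter (lines : List String) (st : List (String × Int)) :
    runA lines st = runA (lines.filter (fun l => !(PySem.Str.strip l == ""))) st :=
  runA_filter_aux (2 * lines.length + st.length) lines st le_rfl

lemma processLine_kv (l : String) (d : Int)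
    (hkv : PySem.Str.isIn ": " (PySem.Str.strip l) = true) :
    pvProcessLine l d =
      (match PySem.Str.splitMax? (PySem.Str.strip l) ": " 1 with
       | some (key :: value :: _) =>
           pvRep d ++ "<" ++ key ++ ">" ++ value ++ "</" ++ key ++ ">\n"
       | _ => "") := by
  simp only [pvProcessLine, hkv, if_true]

lemma processLine_key (l : String) (d : Int)
    (hkv : ¬PySem.Str.isIn ": " (PySem.Str.strip l) = true)
    (hk : PySem.Str.isIn ":" (PySem.Str.strip l) = true) :
    pvProcessLine l d =
      pvRep d ++ "<" ++ PySem.Str.slice (PySem.Str.strip l) none (some (-1)) ++ ">\n" := by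
  simp only [pvProcessLine, hkv, hk, Bool.false_eq_true, if_false, if_true]

lemma emit_stop (f : Nat) (l : String) (ls : List String) (floor depth : Int)
    (h : pvIndent l ≤ floor) :
    pvEmit (f + 1) (l :: ls) floor depth = (l :: ls, "") := by
  simp [pvEmit, h]

lemma emit_kv (f : Nat) (l : String) (ls : List String) (floor depth : Int)
    (hf : ls.length ≤ f) (h1 : ¬pvIndent l ≤ floor)
    (hkv : PySem.Str.isIn ": " (PySem.Str.strip l) = true) :
    pvEmit (f + 1) (l :: ls) floor depth =
      ((pvEmit ls.length ls floor depth).1,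
       pvProcessLine l depth ++ (pvEmit ls.length ls floor depth).2) := by
  simp only [pvEmit, h1, hkv, Bool.false_eq_true, if_false, if_true]
  rw [pvEmit_fuel f ls.length ls floor depth hf le_rfl, processLine_kv l depth hkv]

lemma emit_key (f : Nat) (l : String) (ls : List String) (floor depth : Int)
    (hf : ls.length ≤ f) (h1 : ¬pvIndent l ≤ floor)
    (hkv : ¬PySem.Str.isIn ": " (PySem.Str.strip l) = true)
    (hk : PySem.Str.isIn ":" (PySem.Str.strip l) = true) :
    pvEmit (f + 1) (l :: ls) floor depth =
      ((pvEmit (pvEmit ls.length ls (pvIndent l) (depth + 1)).1.length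
          (pvEmit ls.length ls (pvIndent l) (depth + 1)).1 floor depth).1,
       pvProcessLine l depth ++ (pvEmit ls.length ls (pvIndent l) (depth + 1)).2 ++
         pvRep (depth + 1) ++ "</" ++
         PySem.Str.slice (PySem.Str.strip l) none (some (-1)) ++ ">\n" ++
         (pvEmit (pvEmit ls.length ls (pvIndent l) (depth + 1)).1.length
            (pvEmit ls.length ls (pvIndent l) (depth + 1)).1 floor depth).2) := by
  simp only [pvEmit, h1, hkv, hk, Bool.false_eq_true, if_false, if_true]
  rw [pvEmit_fuel f ls.length ls (pvIndent l) (depth + 1) hf le_rfl]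
  rw [pvEmit_fuel f (pvEmit ls.length ls (pvIndent l) (depth + 1)).1.length
        (pvEmit ls.length ls (pvIndent l) (depth + 1)).1 floor depth
        (le_trans (pvEmit_len ls.length ls (pvIndent l) (depth + 1)) hf) le_rfl]
  rw [processLine_key l depth hkv hk]

lemma emit_skip (f : Nat) (l : String) (ls : List String) (floor depth : Int)
    (hf : ls.length ≤ f) (h1 : ¬pvIndent l ≤ floor)
    (hkv : ¬PySem.Str.isIn ": " (PySem.Str.strip l) = true)
    (hk : ¬PySem.Str.isIn ":" (PySem.Str.strip l) = true) :
    pvEmit (f + 1) (l :: ls) floor depth = pvEmit ls.length ls floor depth := by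
  simp only [pvEmit, h1, hkv, hk, Bool.false_eq_true, if_false, if_true]
  exact pvEmit_fuel f ls.length ls floor depth hf le_rfl

lemma wrap_aux : ∀ (n : Nat) (lines : List String) (st : List (String × Int)),
    2 * lines.length + st.length ≤ n →
    (∀ l ∈ lines, ¬(PySem.Str.strip l == "") = true) →
    runA lines st = pvWrap st lines := by
  intro n
  induction n with
  | zero =>
    intro lines st h hbf
    cases lines with
    | cons l ls => simp at h
    | nil =>
      cases st with
      | cons p s => simp at h
      | nil => simp [runA, pvWrap, pvEmit]
  | succ n ih =>
    intro lines st h hbf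
    cases lines with
    | nil =>
      cases st with
      | nil => simp [runA, pvWrap, pvEmit]
      | cons p st' =>
        obtain ⟨k, i⟩ := p
        rw [runA, pvWrap]
        have he : pvEmit ([] : List String).length [] i ((st'.length : Int) + 2) = ([], "") := by
          simp [pvEmit]
        rw [he]
        rw [← ih [] st' (by simp only [List.length_cons] at h ⊢; omega) (by simp)]
        simp [String.append_assoc]
    | cons l ls =>
      have hb : ¬(PySem.Str.strip l == "") = true := hbf l (List.mem_cons_self)
      have hbf' : ∀ x ∈ ls, ¬(PySem.Str.strip x == "") = true :=
        fun x hx => hbf x (List.mem_cons_of_mem l hx)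
      have hind := pvIndent_nonneg l
      cases st with
      | nil =>
        have h1 : ¬pvIndent l ≤ (-1 : Int) := by omega
        rw [runA]
        simp only [hb, Bool.false_eq_true, if_false]
        by_cases hkv : PySem.Str.isIn ": " (PySem.Str.strip l) = true
        · simp only [hkv, if_true]
          have hrhs : pvWrap [] (l :: ls) =
              pvProcessLine l 1 ++ pvWrap [] ls := by
            rw [pvWrap, pvWrap]
            simp only [List.length_cons]
            rw [emit_kv ls.length l ls (-1) 1 le_rfl h1 hkv]
          rw [hrhs, ih ls [] (by simp only [List.length_cons] at h ⊢; omega) hbf']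
        · by_cases hk : PySem.Str.isIn ":" (PySem.Str.strip l) = true
          · simp only [hkv, hk, Bool.false_eq_true, if_false, if_true]
            rw [ih ls [(PySem.Str.slice (PySem.Str.strip l) none (some (-1)), pvIndent l)]
              (by simp only [List.length_cons, List.length_singleton] at h ⊢; omega) hbf']
            rw [pvWrap, pvWrap, pvWrap]
            simp only [List.length_cons, List.length_nil, Nat.cast_zero, zero_add]
            rw [emit_key ls.length l ls (-1) 1 le_rfl h1 hkv hk]
            have e21 : (1 : Int) + 1 = 2 := by norm_num
            rw [e21]
            rw [processLine_key l 1 hkv hk]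
            simp [String.append_assoc]
          · simp only [hkv, hk, Bool.false_eq_true, if_false]
            rw [ih ls [] (by simp only [List.length_cons] at h ⊢; omega) hbf']
            rw [pvWrap, pvWrap]
            simp only [List.length_cons]
            rw [emit_skip ls.length l ls (-1) 1 le_rfl h1 hkv hk]
      | cons p st' =>
        obtain ⟨k, i⟩ := p
        rw [runA]
        simp only [hb, Bool.false_eq_true, if_false]
        by_cases hp : i ≥ pvIndent l
        · simp only [hp, if_true]
          rw [pvWrap]
          simp only [List.length_cons]
          rw [emit_stop ls.length l ls i ((st'.length : Int) + 2) hp]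
          rw [← ih (l :: ls) st' (by simp only [List.length_cons] at h ⊢; omega) hbf]
          simp [String.append_assoc]
        · have h1 : ¬pvIndent l ≤ i := by omega
          simp only [hp, Bool.false_eq_true, if_false]
          by_cases hkv : PySem.Str.isIn ": " (PySem.Str.strip l) = true
          · simp only [hkv, if_true]
            rw [ih ls ((k, i) :: st') (by simp only [List.length_cons] at h ⊢; omega) hbf']
            rw [pvWrap, pvWrap]
            simp only [List.length_cons]
            rw [emit_kv ls.length l ls i ((st'.length : Int) + 2) le_rfl h1 hkv]
            simp [String.append_assoc]
          · by_cases hk : PySem.Str.isIn ":" (PySem.Str.strip l) = true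
            · simp only [hkv, hk, Bool.false_eq_true, if_false, if_true]
              rw [ih ls ((PySem.Str.slice (PySem.Str.strip l) none (some (-1)), pvIndent l) ::
                  (k, i) :: st')
                (by simp only [List.length_cons] at h ⊢; omega) hbf']
              rw [pvWrap, pvWrap, pvWrap]
              simp only [List.length_cons]
              rw [emit_key ls.length l ls i ((st'.length : Int) + 2) le_rfl h1 hkv hk]
              have ecast : (((st'.length + 1 : Nat) : Int) + 2) = ((st'.length : Int) + 2) + 1 := by
                push_cast; ring
              rw [ecast]
              rw [processLine_key l ((st'.length : Int) + 2) hkv hk]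
              simp [String.append_assoc]
            · simp only [hkv, hk, Bool.false_eq_true, if_false]
              rw [ih ls ((k, i) :: st') (by simp only [List.length_cons] at h ⊢; omega) hbf']
              rw [pvWrap, pvWrap]
              simp only [List.length_cons]
              rw [emit_skip ls.length l ls i ((st'.length : Int) + 2) le_rfl h1 hkv hk]

lemma runA_eq_pvWrap (lines : List String) (st : List (String × Int))
    (hbf : ∀ l ∈ lines, ¬(PySem.Str.strip l == "")) :
    runA lines st = pvWrap st lines :=
  wrap_aux (2 * lines.length + st.length) lines st le_rfl hbf

-- ===== VERDICT (by name: the statement is the Claim_ definition above) =====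
theorem yaml_to_xml_spec : Claim_equal_yaml_to_xml := by
  intro y _
  show yaml_to_xml y = yaml_to_xml_alt y
  have hA := foldA_eq_runA (PySem.Str.splitlines y) [] "<root>\n"
  simp only [List.length_nil, Nat.cast_zero, zero_add] at hA
  have h1 : yaml_to_xml y = "<root>\n" ++ runA (PySem.Str.splitlines y) [] ++ "</root>" := by
    unfold yaml_to_xml
    rw [← hA]
  rw [h1, runA_filter,
      runA_eq_pvWrap _ _ (by intro l hl; simpa using (List.mem_filter.mp hl).2)]
  rfl
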